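-- pv_equiv track=rewrite | github.com/tiendatnguyen-vision/KAIST_courseworks | Natural language processing with Python/HW3/CS372_HW3_code_20190883.py | contain_relation2
-- ===== SOURCE A (Python) =====
-- def contain_relation2(s1,list_string,c2):
--     for i in range(len(s1)):
--         if (i==0):
--             s11= c2+s1[1:]
--             if s11 in list_string:
--                 return True
--         elif (i==len(s1)-1):
--             s11= s1[:-1]+c2
--             if s11 in list_string:
--                 return True
--         else:
--             s11= s1[:i]+ c2 + s1[i+1:]
--             if s11 in list_string:
--                 return True
--     return False
-- ===== SOURCE B (Python) =====
-- def contain_relation2(s1, list_string, c2):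
--     n, k = len(s1), len(c2)
--     m = n + k - 1
--     for t in list_string:
--         if len(t) != m:
--             continue
--         # longest common prefix of s1 and t
--         p = 0
--         while p < n and p < m and s1[p] == t[p]:
--             p += 1
--         # longest common suffix of s1 and t
--         q = 0
--         while q < n and q < m and s1[n - 1 - q] == t[m - 1 - q]:
--             q += 1
--         # a substitution position i must lie in this window; verify c2 sits there in t
--         i = max(0, n - 1 - q)
--         hi = min(p, n - 1)
--         while i <= hi:
--             if t[i:i + k] == c2:
--                 return True
--             i += 1
--     return False
-- ===== Notes on version B (the rewrite author's own statement) =====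
-- stated objective: faster
-- what changed: Instead of building every single-position substitution of s1 and scanning the whole list for it, B makes one pass over the list, filters candidates by length, computes the common prefix/suffix lengths with s1 and verifies c2 only in the small feasible window (the classic one-edit check), so no substitution strings are constructed and no repeated membership scans occur.
import Mathlib
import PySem

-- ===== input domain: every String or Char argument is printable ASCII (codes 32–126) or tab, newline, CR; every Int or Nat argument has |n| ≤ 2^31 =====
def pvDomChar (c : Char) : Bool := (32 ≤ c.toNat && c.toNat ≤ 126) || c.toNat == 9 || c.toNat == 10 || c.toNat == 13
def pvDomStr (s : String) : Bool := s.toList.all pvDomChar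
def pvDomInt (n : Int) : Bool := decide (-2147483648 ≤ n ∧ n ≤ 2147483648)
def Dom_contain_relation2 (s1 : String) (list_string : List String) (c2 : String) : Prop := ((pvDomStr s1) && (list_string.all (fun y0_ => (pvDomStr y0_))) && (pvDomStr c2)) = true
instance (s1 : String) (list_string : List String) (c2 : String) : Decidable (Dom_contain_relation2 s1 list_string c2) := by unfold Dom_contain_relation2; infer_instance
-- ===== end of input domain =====

-- B replaces A's "build every substitution of s1 and scan the list for it" by a single pass over
-- the list with a common-prefix/common-suffix window test per candidate (objective: faster).

-- ===== PORT A =====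
-- A's loop 'for i in range(len(s1)): …', with its three slice branches and early return
def containAgo (s1cs : List Char) (L : List (List Char)) (c2cs : List Char) : List Int → Bool
  | [] => false
  | i :: is =>
      if i = 0 then
        let s11 := c2cs ++ PySem.List.slice s1cs (some 1) none
        if L.contains s11 then true else containAgo s1cs L c2cs is
      else if i = (s1cs.length : Int) - 1 then
        let s11 := PySem.List.slice s1cs none (some (-1)) ++ c2cs
        if L.contains s11 then true else containAgo s1cs L c2cs is
      else
        let s11 := PySem.List.slice s1cs none (some i) ++ c2cs ++ PySem.List.slice s1cs (some (i + 1)) none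
        if L.contains s11 then true else containAgo s1cs L c2cs is

def contain_relation2 (s1 : String) (list_string : List String) (c2 : String) : Bool :=
  containAgo s1.toList (list_string.map String.toList) c2.toList
    (PySem.List.pyRange 0 (s1.toList.length : Int) 1)

-- ===== PORT B =====
-- Source B's 'while p < n and p < m and s1[p] == t[p]' common-prefix scan (the common-suffix scan is
-- the same loop run on the reversed strings)
def lcpB : List Char → List Char → Nat
  | a :: as, b :: bs => if a = b then lcpB as bs + 1 else 0
  | _, _ => 0

-- Source B's inner 'while i <= hi: if t[i:i+k] == c2: return True' window scan
def containBscan (t c2cs : List Char) : List Int → Bool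
  | [] => false
  | i :: is =>
      if PySem.List.slice t (some i) (some (i + (c2cs.length : Int))) = c2cs then true
      else containBscan t c2cs is

-- Source B's per-candidate body (after the length filter)
def containBone (s1cs t c2cs : List Char) : Bool :=
  let n : Int := s1cs.length
  let p : Int := lcpB s1cs t
  let q : Int := lcpB s1cs.reverse t.reverse
  containBscan t c2cs (PySem.List.pyRange (max 0 (n - 1 - q)) (min p (n - 1) + 1) 1)

-- Source B's outer 'for t in list_string' loop with the length filter and early return
def containBgo (s1cs c2cs : List Char) : List (List Char) → Bool
  | [] => false
  | t :: ts =>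
      if (t.length : Int) ≠ (s1cs.length : Int) + (c2cs.length : Int) - 1 then
        containBgo s1cs c2cs ts
      else if containBone s1cs t c2cs then true
      else containBgo s1cs c2cs ts

def contain_relation2_alt (s1 : String) (list_string : List String) (c2 : String) : Bool :=
  containBgo s1.toList c2.toList (list_string.map String.toList)

-- ===== PRECONDITION & SPEC =====
def Spec_contain_relation2 (s1 : String) (list_string : List String) (c2 : String) (out : Bool) : Prop := out = contain_relation2_alt s1 list_string c2
instance (s1 : String) (list_string : List String) (c2 : String) (out : Bool) : Decidable (Spec_contain_relation2 s1 list_string c2 out) := by unfold Spec_contain_relation2; infer_instance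

-- ===== CLAIM (what is proved, stated in full; the proofs are below) =====
def Claim_equal_contain_relation2 : Prop := ∀ (s1 : String) (list_string : List String) (c2 : String), Dom_contain_relation2 s1 list_string c2 → Spec_contain_relation2 s1 list_string c2 (contain_relation2 s1 list_string c2)

-- ===== LEMMAS AND PROOFS =====

-- the substitution string at position i (both programs search for it in the list)
def subAt (s1cs c2cs : List Char) (i : Nat) : List Char :=
  s1cs.take i ++ c2cs ++ s1cs.drop (i + 1)

theorem lcpB_take_iff : ∀ (a b : List Char) (i : Nat), i ≤ a.length → i ≤ b.length →
    (a.take i = b.take i ↔ i ≤ lcpB a b) := by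
  intro a
  induction a with
  | nil => intro b i h1 h2; simp at h1; subst h1; simp
  | cons x as ih =>
    intro b i h1 h2
    cases b with
    | nil => simp at h2; subst h2; simp
    | cons y bs =>
      cases i with
      | zero => simp
      | succ j =>
        simp only [List.take_succ_cons, lcpB]
        by_cases hxy : x = y
        · subst hxy
          rw [if_pos rfl]
          simp only [List.cons.injEq, true_and]
          rw [ih bs j (by simpa using h1) (by simpa using h2)]
          omega
        · rw [if_neg hxy]
          simp [hxy]

theorem subAt_length (s1cs c2cs : List Char) (j : Nat) (hj : j < s1cs.length) :
    ((subAt s1cs c2cs j).length : Int) = (s1cs.length : Int) + (c2cs.length : Int) - 1 := by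
  simp [subAt]
  omega

theorem containAgo_cons (s1cs c2cs : List Char) (L : List (List Char)) (i : Int) (is : List Int)
    (h0 : 0 ≤ i) (hn : i < (s1cs.length : Int)) :
    containAgo s1cs L c2cs (i :: is) =
      (L.contains (subAt s1cs c2cs i.toNat) || containAgo s1cs L c2cs is) := by
  by_cases hi0 : i = 0
  · subst hi0
    have hs : c2cs ++ PySem.List.slice s1cs (some 1) none = subAt s1cs c2cs 0 := by
      rw [PySem.List.slice_from_one]
      simp [subAt, List.drop_one]
    simp only [containAgo, if_pos, hs]
    split_ifs with hc <;> simp_all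
  · by_cases hil : i = (s1cs.length : Int) - 1
    · have hj : i.toNat = s1cs.length - 1 := by omega
      have hs : PySem.List.slice s1cs none (some (-1)) ++ c2cs = subAt s1cs c2cs i.toNat := by
        rw [PySem.List.slice_to_neg_one, hj, subAt,
            List.drop_eq_nil_of_le (by omega), List.append_nil, List.dropLast_eq_take]
      simp only [containAgo, if_neg hi0, if_pos hil, hs]
      split_ifs with hc <;> simp_all
    · have hs : PySem.List.slice s1cs none (some i) ++ c2cs ++ PySem.List.slice s1cs (some (i + 1)) none
          = subAt s1cs c2cs i.toNat := by
        rw [PySem.List.slice_to s1cs (b := i) h0, PySem.List.slice_from s1cs (a := i + 1) (by omega), subAt]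
        have : (i + 1).toNat = i.toNat + 1 := by omega
        rw [this]
      simp only [containAgo, if_neg hi0, if_neg hil, hs]
      split_ifs with hc <;> simp_all

theorem containAgo_iff (s1cs c2cs : List Char) (L : List (List Char)) (is : List Int)
    (h : ∀ i ∈ is, 0 ≤ i ∧ i < (s1cs.length : Int)) :
    containAgo s1cs L c2cs is = true ↔ ∃ i ∈ is, subAt s1cs c2cs i.toNat ∈ L := by
  induction is with
  | nil => simp [containAgo]
  | cons i is ih =>
    obtain ⟨h0, hn⟩ := h i (List.mem_cons_self ..)
    rw [containAgo_cons s1cs c2cs L i is h0 hn]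
    rw [Bool.or_eq_true, ih (fun j hj => h j (List.mem_cons_of_mem _ hj))]
    simp

theorem containBscan_iff (t c2cs : List Char) (is : List Int) :
    containBscan t c2cs is = true ↔
      ∃ i ∈ is, PySem.List.slice t (some i) (some (i + (c2cs.length : Int))) = c2cs := by
  induction is with
  | nil => simp [containBscan]
  | cons i is ih =>
    simp only [containBscan]
    split_ifs with h
    · simp [h]
    · simp [ih, h]

theorem containBone_iff (s1cs t c2cs : List Char)
    (hlen : (t.length : Int) = (s1cs.length : Int) + (c2cs.length : Int) - 1) :
    containBone s1cs t c2cs = true ↔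
      ∃ j : Nat, j < s1cs.length ∧ t = subAt s1cs c2cs j := by
  simp only [containBone]
  rw [containBscan_iff]
  simp only [PySem.List.mem_pyRange_one]
  constructor
  · rintro ⟨i, ⟨hlo, hhi⟩, hsl⟩
    have h0 : 0 ≤ i := le_trans (le_max_left _ _) hlo
    have hlo' : ((s1cs.length : Int) - 1 - (lcpB s1cs.reverse t.reverse : Int)) ≤ i :=
      le_trans (le_max_right _ _) hlo
    have hp : i ≤ (lcpB s1cs t : Int) := by omega
    have hn1 : i ≤ (s1cs.length : Int) - 1 := by omega
    set j := i.toNat with hjdef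
    have hij : (j : Int) = i := Int.toNat_of_nonneg h0
    have hjn : j + 1 ≤ s1cs.length := by omega
    have hpre : s1cs.take j = t.take j :=
      (lcpB_take_iff s1cs t j (by omega) (by omega)).mpr (by omega)
    have hq : s1cs.length - 1 - j ≤ lcpB s1cs.reverse t.reverse := by omega
    have hsuf : s1cs.reverse.take (s1cs.length - 1 - j) = t.reverse.take (s1cs.length - 1 - j) :=
      (lcpB_take_iff s1cs.reverse t.reverse _ (by simp; omega) (by simp; omega)).mpr hq
    have e1 : (s1cs.drop (j + 1)).reverse = s1cs.reverse.take (s1cs.length - 1 - j) := by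
      rw [List.reverse_drop]; congr 1; omega
    have e2 : (t.drop (j + c2cs.length)).reverse = t.reverse.take (s1cs.length - 1 - j) := by
      rw [List.reverse_drop]; congr 1; omega
    have hdrop : t.drop (j + c2cs.length) = s1cs.drop (j + 1) :=
      List.reverse_injective (by rw [e1, e2, hsuf])
    have hmid : (t.drop j).take c2cs.length = c2cs := by
      rw [PySem.List.slice_toNat t (a := i) (b := i + (c2cs.length : Int)) h0 (by omega)] at hsl
      have h2 : (i + (c2cs.length : Int)).toNat - i.toNat = c2cs.length := by omega
      rwa [h2] at hsl
    refine ⟨j, by omega, ?_⟩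
    calc t = t.take j ++ ((t.drop j).take c2cs.length ++ (t.drop j).drop c2cs.length) := by
            rw [List.take_append_drop, List.take_append_drop]
      _ = s1cs.take j ++ (c2cs ++ s1cs.drop (j + 1)) := by
            rw [← hpre, hmid, List.drop_drop, hdrop]
      _ = subAt s1cs c2cs j := by simp [subAt]
  · rintro ⟨j, hjn, rfl⟩
    have hA : subAt s1cs c2cs j = s1cs.take j ++ (c2cs ++ s1cs.drop (j + 1)) := by
      simp [subAt]
    have hlt : (s1cs.take j).length = j := by simp; omega
    have htake : (subAt s1cs c2cs j).take j = s1cs.take j := by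
      rw [hA, List.take_left' hlt]
    have hdropj : (subAt s1cs c2cs j).drop j = c2cs ++ s1cs.drop (j + 1) := by
      rw [hA, List.drop_left' hlt]
    have hmid : ((subAt s1cs c2cs j).drop j).take c2cs.length = c2cs := by
      rw [hdropj, List.take_left]
    have hsufdrop : (subAt s1cs c2cs j).drop (j + c2cs.length) = s1cs.drop (j + 1) := by
      rw [← List.drop_drop, hdropj, List.drop_left]
    have hp : j ≤ lcpB s1cs (subAt s1cs c2cs j) :=
      (lcpB_take_iff s1cs (subAt s1cs c2cs j) j (by omega) (by omega)).mp htake.symm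
    have e1 : (s1cs.drop (j + 1)).reverse = s1cs.reverse.take (s1cs.length - 1 - j) := by
      rw [List.reverse_drop]; congr 1; omega
    have e2 : ((subAt s1cs c2cs j).drop (j + c2cs.length)).reverse
        = (subAt s1cs c2cs j).reverse.take (s1cs.length - 1 - j) := by
      rw [List.reverse_drop]; congr 1; omega
    have hq : s1cs.length - 1 - j ≤ lcpB s1cs.reverse (subAt s1cs c2cs j).reverse := by
      refine (lcpB_take_iff _ _ _ (by simp; omega) (by simp; omega)).mp ?_
      rw [← e1, ← e2, hsufdrop]
    refine ⟨(j : Int), ⟨by omega, by omega⟩, ?_⟩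
    rw [PySem.List.slice_natCast_add]
    exact hmid

theorem containBgo_iff (s1cs c2cs : List Char) (L : List (List Char)) :
    containBgo s1cs c2cs L = true ↔
      ∃ t ∈ L, ∃ j : Nat, j < s1cs.length ∧ t = subAt s1cs c2cs j := by
  induction L with
  | nil => simp [containBgo]
  | cons t ts ih =>
    simp only [containBgo]
    split_ifs with hl hb
    · rw [ih]
      simp only [List.mem_cons]
      constructor
      · rintro ⟨t', h1, h2⟩; exact ⟨t', Or.inr h1, h2⟩
      · rintro ⟨t', h1 | h1, j, hj, hEq⟩
        · exact absurd (hEq ▸ subAt_length s1cs c2cs j hj : (t'.length : Int) = _) (h1 ▸ hl)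
        · exact ⟨t', h1, j, hj, hEq⟩
    · push Not at hl
      obtain ⟨j, hj, hEq⟩ := (containBone_iff s1cs t c2cs hl).mp hb
      simp only [List.mem_cons, true_iff]
      exact ⟨t, Or.inl rfl, j, hj, hEq⟩
    · push Not at hl
      rw [ih]
      simp only [List.mem_cons]
      constructor
      · rintro ⟨t', h1, h2⟩; exact ⟨t', Or.inr h1, h2⟩
      · rintro ⟨t', h1 | h1, j, hj, hEq⟩
        · exact absurd ((containBone_iff s1cs t c2cs hl).mpr ⟨j, hj, h1 ▸ hEq⟩) (by simpa using hb)
        · exact ⟨t', h1, j, hj, hEq⟩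

-- ===== VERDICT (by name: the statement is the Claim_ definition above) =====
theorem contain_relation2_spec : Claim_equal_contain_relation2 := by
  intro s1 L c2 _
  unfold Spec_contain_relation2 contain_relation2 contain_relation2_alt
  rw [Bool.eq_iff_iff]
  rw [containAgo_iff s1.toList c2.toList (L.map String.toList) _
        (fun i hi => (PySem.List.mem_pyRange_one.mp hi))]
  rw [containBgo_iff]
  constructor
  · rintro ⟨i, hi, hmem⟩
    obtain ⟨h0, hn⟩ := PySem.List.mem_pyRange_one.mp hi
    exact ⟨subAt s1.toList c2.toList i.toNat, hmem, i.toNat, by omega, rfl⟩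
  · rintro ⟨t, ht, j, hj, rfl⟩
    refine ⟨(j : Int), PySem.List.mem_pyRange_one.mpr ⟨by omega, by omega⟩, ?_⟩
    simpa using ht
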